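-- pv_equiv track=rewrite | github.com/ahuggins20/CS5 | emirpBase12.py | reverse_b12
-- ===== SOURCE A (Python) =====
-- def reverse_b12(x):
--     b12_x=''
--     while x>0:
--         end=x%12
--         if end>=10:
--             if end==10:
--                 b12_x+="A"
--             if end==11:
--                 b12_x+="B"
--         else:
--             b12_x+=str(x%12)
--         x=x//12
--     return b12_x
-- ===== SOURCE B (Python) =====
-- def _digit(d):
--     if d == 10:
--         return "A"
--     if d == 11:
--         return "B"
--     return str(d)
--
-- def reverse_b12(x):
--     if x <= 0:
--         return ""
--     return _digit(x % 12) + reverse_b12(x // 12)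
-- ===== Notes on version B (the rewrite author's own statement) =====
-- stated objective: simpler
-- what changed: Replaced the while-loop with a string accumulator and nested digit branching by a direct recursion that emits the least-significant base-12 digit followed by the recursion on the quotient, with a small digit helper.
import Mathlib
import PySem

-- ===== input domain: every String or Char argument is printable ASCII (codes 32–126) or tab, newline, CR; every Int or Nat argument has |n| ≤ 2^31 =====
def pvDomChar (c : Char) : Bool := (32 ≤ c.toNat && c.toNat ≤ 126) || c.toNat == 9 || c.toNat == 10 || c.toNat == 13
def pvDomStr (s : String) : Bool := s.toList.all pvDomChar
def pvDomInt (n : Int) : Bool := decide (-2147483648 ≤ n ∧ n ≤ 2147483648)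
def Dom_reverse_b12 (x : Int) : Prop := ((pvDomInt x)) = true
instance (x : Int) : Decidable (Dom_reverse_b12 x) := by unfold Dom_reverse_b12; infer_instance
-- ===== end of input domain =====

-- B replaces A's while-loop with accumulator and nested digit branching by a direct
-- recursion emitting digit(x%12) ++ recurse(x//12) (objective: simpler).


-- ===== PORT A =====
-- the while loop, with the accumulator b12_x as explicit state
def reverse_b12_loop (b12_x : String) (x : Int) : String :=
  if _h : x > 0 then
    let e := PySem.Int.mod x 12
    let acc :=
      if e ≥ 10 then
        let a1 := if e = 10 then b12_x ++ "A" else b12_x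
        if e = 11 then a1 ++ "B" else a1
      else b12_x ++ PySem.Int.toStr (PySem.Int.mod x 12)
    reverse_b12_loop acc (PySem.Int.floordiv x 12)
  else b12_x
termination_by x.toNat
decreasing_by
  simp only [PySem.Int.floordiv_eq_ediv_of_pos (by omega : (0:Int) < 12)]
  omega

def reverse_b12 (x : Int) : String := reverse_b12_loop "" x

-- ===== PORT B =====
def reverse_b12_digit (d : Int) : String :=
  if d = 10 then "A" else if d = 11 then "B" else PySem.Int.toStr d

def reverse_b12_alt (x : Int) : String :=
  if _h : x ≤ 0 then ""
  else reverse_b12_digit (PySem.Int.mod x 12) ++ reverse_b12_alt (PySem.Int.floordiv x 12)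
termination_by x.toNat
decreasing_by
  simp only [PySem.Int.floordiv_eq_ediv_of_pos (by omega : (0:Int) < 12)]
  omega

-- ===== PRECONDITION & SPEC =====
def Spec_reverse_b12 (x : Int) (out : String) : Prop := out = reverse_b12_alt x
instance (x : Int) (out : String) : Decidable (Spec_reverse_b12 x out) := by unfold Spec_reverse_b12; infer_instance

-- ===== CLAIM (what is proved, stated in full; the proofs are below) =====
def Claim_equal_reverse_b12 : Prop := ∀ (x : Int), Dom_reverse_b12 x → Spec_reverse_b12 x (reverse_b12 x)

-- ===== LEMMAS AND PROOFS =====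
theorem reverse_b12_loop_eq (n : Nat) :
    ∀ (x : Int), x.toNat ≤ n → ∀ (acc : String),
      reverse_b12_loop acc x = acc ++ reverse_b12_alt x := by
  induction n with
  | zero =>
    intro x hx acc
    rw [reverse_b12_loop, reverse_b12_alt]
    have hx0 : ¬ x > 0 := by omega
    simp [hx0, show x ≤ 0 by omega]
  | succ n ih =>
    intro x hx acc
    rw [reverse_b12_loop, reverse_b12_alt]
    by_cases hpos : x > 0
    · simp only [hpos, dif_pos, show ¬ x ≤ 0 by omega, dif_neg, not_false_iff]
      have hmod : PySem.Int.mod x 12 = x % 12 :=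
        PySem.Int.mod_eq_emod_of_pos (by omega)
      have hdec : (PySem.Int.floordiv x 12).toNat ≤ n := by
        rw [PySem.Int.floordiv_eq_ediv_of_pos (by omega : (0:Int) < 12)]
        omega
      rw [ih _ hdec]
      have hb : 0 ≤ x % 12 ∧ x % 12 < 12 := by omega
      unfold reverse_b12_digit
      by_cases h10 : x % 12 = 10
      · simp [h10, String.append_assoc]
      · by_cases h11 : x % 12 = 11
        · simp [h11, String.append_assoc]
        · simp [h10, h11, show ¬ x % 12 ≥ 10 by omega, String.append_assoc]
    · simp [hpos, show x ≤ 0 by omega]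

-- ===== VERDICT (by name: the statement is the Claim_ definition above) =====
theorem reverse_b12_spec : Claim_equal_reverse_b12 := by
  intro x _
  unfold Spec_reverse_b12 reverse_b12
  simpa using reverse_b12_loop_eq x.toNat x le_rfl ""
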